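-- pv_equiv track=rewrite | github.com/adeelkhan11/finance | finance/csvfile.py | _get_pivot
-- ===== SOURCE A (Python) =====
-- def _get_pivot(tbl):
--     newtbl = []
--     width = 0
--     for row in tbl:
--         if len(row) > width:
--             width = len(row)
--     for i in range(width):
--         newtbl.append([])
--     for row in tbl:
--         for i in range(len(row)):
--             newtbl[i].append(row[i])
--
--     return newtbl
-- ===== SOURCE B (Python) =====
-- def _get_pivot(tbl):
--     width = max((len(row) for row in tbl), default=0)
--     return [[row[i] for row in tbl if i < len(row)] for i in range(width)]
-- ===== Notes on version B (the rewrite author's own statement) =====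
-- stated objective: simpler
-- what changed: A scatters row-major into pre-created column lists via in-place appends; B computes the width with max(default=0) and gathers column-major with a nested comprehension, scanning the rows once per column.
import Mathlib
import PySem

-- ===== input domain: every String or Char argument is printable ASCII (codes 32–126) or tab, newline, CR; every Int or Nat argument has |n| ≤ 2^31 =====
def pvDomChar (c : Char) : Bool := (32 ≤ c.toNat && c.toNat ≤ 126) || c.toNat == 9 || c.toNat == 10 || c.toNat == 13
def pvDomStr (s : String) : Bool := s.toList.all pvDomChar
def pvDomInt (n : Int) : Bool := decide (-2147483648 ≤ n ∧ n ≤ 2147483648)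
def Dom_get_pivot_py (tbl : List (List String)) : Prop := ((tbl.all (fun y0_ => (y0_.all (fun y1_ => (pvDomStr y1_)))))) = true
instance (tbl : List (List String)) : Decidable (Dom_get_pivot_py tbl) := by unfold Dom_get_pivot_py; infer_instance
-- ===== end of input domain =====

-- B replaces A's row-major scatter into pre-created column lists by a column-major
-- gather (max width, then one comprehension per column); same values, simpler code.

-- ===== PORT A =====
-- newtbl[i].append(row[i]) is ported as a functional update of slot i; the index i
-- is always in range (i < len(row) ≤ width = len(newtbl)), so pyGetD's default is
-- never used and List.set never falls out of range.
def get_pivot_py (tbl : List (List String)) : List (List String) :=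
  let width : Nat := tbl.foldl (fun w row => if row.length > w then row.length else w) 0
  let newtbl : List (List String) :=
    (PySem.List.pyRange 0 (width : Int) 1).foldl (fun nt _ => nt ++ [[]]) []
  tbl.foldl (fun nt row =>
    (PySem.List.pyRange 0 (row.length : Int) 1).foldl (fun nt i =>
      nt.set i.toNat (PySem.List.pyGetD nt i [] ++ [PySem.List.pyGetD row i ""])) nt) newtbl

-- ===== PORT B =====
def get_pivot_py_alt (tbl : List (List String)) : List (List String) :=
  let width : Nat := tbl.foldl (fun w row => max w row.length) 0
  (PySem.List.pyRange 0 (width : Int) 1).map (fun i =>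
    tbl.foldl (fun col row =>
      if i < (row.length : Int) then col ++ [PySem.List.pyGetD row i ""] else col) [])

-- ===== PRECONDITION & SPEC =====
def Spec_get_pivot_py (tbl : List (List String)) (out : List (List String)) : Prop := out = get_pivot_py_alt tbl
instance (tbl : List (List String)) (out : List (List String)) : Decidable (Spec_get_pivot_py tbl out) := by unfold Spec_get_pivot_py; infer_instance

-- ===== CLAIM (what is proved, stated in full; the proofs are below) =====
def Claim_equal_get_pivot_py : Prop := ∀ (tbl : List (List String)), Dom_get_pivot_py tbl → Spec_get_pivot_py tbl (get_pivot_py tbl)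

-- ===== LEMMAS AND PROOFS =====

-- both width computations agree
theorem width_eq (tbl : List (List String)) :
    tbl.foldl (fun w row => if row.length > w then row.length else w) 0
      = tbl.foldl (fun (w : Nat) row => max w row.length) 0 := by
  have h : (fun (w : Nat) (row : List String) => if row.length > w then row.length else w)
      = fun (w : Nat) row => max w row.length := by
    funext w row; split_ifs with h <;> omega
  rw [h]

-- the pre-created newtbl is width empty lists
theorem foldl_append_empty {α : Type} (xs : List α) (init : List (List String)) :
    xs.foldl (fun nt _ => nt ++ [[]]) init = init ++ List.replicate xs.length [] := by
  induction xs generalizing init with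
  | nil => simp
  | cons x xs ih => simp [ih, List.replicate_succ]

-- effect of the inner index loop (over range(m)) on slot j, and its length
theorem inner_len (row : List String) (m : Nat) (nt : List (List String)) :
    ((PySem.List.pyRange 0 (m : Int) 1).foldl (fun nt i =>
        nt.set i.toNat (PySem.List.pyGetD nt i [] ++ [PySem.List.pyGetD row i ""])) nt).length
      = nt.length := by
  induction m with
  | zero => simp
  | succ m ih =>
    have : ((m + 1 : Nat) : Int) = (m : Int) + 1 := by push_cast; ring
    rw [this, PySem.List.pyRange_one_succ_right (by positivity), List.foldl_append]
    simp [ih]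

theorem inner_loop (row : List String) (m : Nat) (nt : List (List String)) (j : Nat) :
    ((PySem.List.pyRange 0 (m : Int) 1).foldl (fun nt i =>
        nt.set i.toNat (PySem.List.pyGetD nt i [] ++ [PySem.List.pyGetD row i ""])) nt)[j]?
      = if j < m ∧ j < nt.length then some (nt.getD j [] ++ [row.getD j ""]) else nt[j]? := by
  induction m with
  | zero => simp
  | succ m ih =>
    have hc : ((m + 1 : Nat) : Int) = (m : Int) + 1 := by push_cast; ring
    rw [hc, PySem.List.pyRange_one_succ_right (by positivity), List.foldl_append]
    have hlen := inner_len row m nt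
    simp only [List.foldl_cons, List.foldl_nil, PySem.List.pyGetD_natCast, Int.toNat_natCast]
    by_cases hjm : j = m
    · subst hjm
      by_cases hjl : j < nt.length
      · rw [List.getElem?_set_self (by omega), if_pos ⟨by omega, hjl⟩]
        have : (List.foldl (fun nt i =>
            nt.set i.toNat (PySem.List.pyGetD nt i [] ++ [PySem.List.pyGetD row i ""])) nt
            (PySem.List.pyRange 0 (j : Int) 1)).getD j []
            = nt.getD j [] := by
          rw [List.getD_eq_getElem?_getD, ih, if_neg (by omega), ← List.getD_eq_getElem?_getD]
        rw [this]
      · rw [List.set_eq_of_length_le (by omega), ih, if_neg (by omega), if_neg (by omega)]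
    · rw [List.getElem?_set_ne (by omega), ih]
      by_cases h1 : j < m ∧ j < nt.length
      · rw [if_pos h1, if_pos (by omega)]
      · rw [if_neg h1, if_neg (by omega)]

-- effect of the whole scatter loop on slot j, and its length
theorem scatter_len (rows : List (List String)) (nt : List (List String)) :
    (rows.foldl (fun nt row =>
        (PySem.List.pyRange 0 (row.length : Int) 1).foldl (fun nt i =>
          nt.set i.toNat (PySem.List.pyGetD nt i [] ++ [PySem.List.pyGetD row i ""])) nt) nt).length
      = nt.length := by
  induction rows generalizing nt with
  | nil => rfl
  | cons r rows ih => simp [ih, inner_len]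

theorem scatter_loop (rows : List (List String)) (nt : List (List String)) (j : Nat)
    (hj : j < nt.length) :
    (rows.foldl (fun nt row =>
        (PySem.List.pyRange 0 (row.length : Int) 1).foldl (fun nt i =>
          nt.set i.toNat (PySem.List.pyGetD nt i [] ++ [PySem.List.pyGetD row i ""])) nt) nt)[j]?
      = some (nt.getD j [] ++ rows.filterMap (fun r => r[j]?)) := by
  induction rows generalizing nt with
  | nil => simp [List.getElem?_eq_getElem hj, List.getD_eq_getElem?_getD]
  | cons r rows ih =>
    simp only [List.foldl_cons, List.filterMap_cons]
    rw [ih _ (by rw [inner_len]; exact hj)]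
    rw [List.getD_eq_getElem?_getD, inner_loop]
    by_cases hjr : j < r.length
    · rw [if_pos ⟨hjr, hj⟩, List.getElem?_eq_getElem hjr]
      simp [List.getD_eq_getElem?_getD, List.getElem?_eq_getElem hjr]
    · rw [if_neg (by omega), List.getElem?_eq_none (by omega : r.length ≤ j)]
      simp [List.getD_eq_getElem?_getD]

-- B's column comprehension gathers exactly the defined entries at index j
theorem gather_eq_filterMap (tbl : List (List String)) (j : Nat) (acc : List String) :
    tbl.foldl (fun col row =>
        if (j : Int) < (row.length : Int) then col ++ [PySem.List.pyGetD row (j : Int) ""] else col) acc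
      = acc ++ tbl.filterMap (fun r => r[j]?) := by
  induction tbl generalizing acc with
  | nil => simp
  | cons r rows ih =>
    simp only [List.foldl_cons, List.filterMap_cons]
    by_cases hjr : j < r.length
    · rw [if_pos (by exact_mod_cast hjr), ih, List.getElem?_eq_getElem hjr]
      simp [List.getD_eq_getElem?_getD, List.getElem?_eq_getElem hjr]
    · rw [if_neg (by exact_mod_cast hjr), ih, List.getElem?_eq_none (by omega : r.length ≤ j)]

-- ===== VERDICT (by name: the statement is the Claim_ definition above) =====
theorem get_pivot_py_spec : Claim_equal_get_pivot_py := by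
  intro tbl _
  unfold Spec_get_pivot_py get_pivot_py get_pivot_py_alt
  simp only [width_eq, foldl_append_empty, List.nil_append, PySem.List.length_pyRange_one]
  set width := tbl.foldl (fun (w : Nat) row => max w row.length) 0 with hw
  have hwn : ((width : Int) - 0).toNat = width := by omega
  rw [hwn]
  apply List.ext_getElem?
  intro j
  have hA_len := scatter_len tbl (List.replicate width ([] : List String))
  by_cases hj : j < width
  · rw [scatter_loop tbl (List.replicate width ([] : List String)) j (by simpa using hj),
        List.getElem?_map, PySem.List.getElem?_pyRange_one, if_pos (by omega : j < ((width : Int) - 0).toNat)]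
    simp only [Option.map_some, zero_add]
    rw [gather_eq_filterMap tbl j []]
    simp [List.getD_eq_getElem?_getD]
  · rw [List.getElem?_eq_none (by rw [hA_len]; simpa using hj),
        List.getElem?_eq_none (by simpa [PySem.List.length_pyRange_one] using hj)]
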